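-- pv_equiv track=rewrite | github.com/miichoow/ACMEEW | src/acmeeh/services/csr_validator.py | _check_subdomain_depth
-- ===== SOURCE A (Python) =====
-- def _check_subdomain_depth(
--     name: str,
--     base_domains: list[str],
--     max_depth: int,
-- ) -> str | None:
--     """Check that *name* does not exceed *max_depth* labels beyond a base domain.
--
--     Return a violation string or ``None``.
--     """
--     lower_name = name.lower()
--
--     # Strip wildcard prefix for base-domain matching, but the wildcard
--     # label still counts toward depth.
--     match_name = lower_name.removeprefix("*.")
--
--     # Find the longest matching base domain.
--     best_base: str | None = None
--     for bd in base_domains: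
--         bd_lower = bd.lower()
--         if match_name == bd_lower or match_name.endswith(
--             "." + bd_lower,
--         ):
--             if best_base is None or len(bd_lower) > len(best_base):
--                 best_base = bd_lower
--
--     if best_base is None:
--         return f"DNS name '{name}' does not match any configured base domain"
--
--     # Count depth = total labels in original name minus base labels.
--     total_labels = len(lower_name.split("."))
--     base_labels = len(best_base.split("."))
--     depth = total_labels - base_labels
--
--     if depth > max_depth:
--         return (
--             f"DNS name '{name}' has subdomain depth {depth} "
--             f"which exceeds maximum allowed depth {max_depth} "
--             f"(base domain: '{best_base}')"
--         )
--
--     return None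
-- ===== SOURCE B (Python) =====
-- def _check_subdomain_depth(
--     name: str,
--     base_domains: list[str],
--     max_depth: int,
-- ) -> str | None:
--     """Check that *name* does not exceed *max_depth* labels beyond a base domain.
--
--     Return a violation string or ``None``.
--     """
--     lower_name = name.lower()
--     match_name = lower_name.removeprefix("*.")
--
--     # Probe the dot-suffixes of match_name longest-first against a set of
--     # the lowercased base domains: the first hit IS the longest match.
--     bases = {bd.lower() for bd in base_domains}
--     cands = [match_name]
--     for i, ch in enumerate(match_name):
--         if ch == ".":
--             cands.append(match_name[i + 1:])
--     best_base = next((c for c in cands if c in bases), None)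
--
--     if best_base is None:
--         return f"DNS name '{name}' does not match any configured base domain"
--
--     total_labels = len(lower_name.split("."))
--     base_labels = len(best_base.split("."))
--     depth = total_labels - base_labels
--
--     if depth > max_depth:
--         return (
--             f"DNS name '{name}' has subdomain depth {depth} "
--             f"which exceeds maximum allowed depth {max_depth} "
--             f"(base domain: '{best_base}')"
--         )
--
--     return None
-- ===== Notes on version B (the rewrite author's own statement) =====
-- stated objective: alternative
-- what changed: Instead of scanning every base domain and keeping the longest match, B lowercases the base domains into a hash set once and probes the dot-suffixes of the (wildcard-stripped) name longest-first; the first suffix found in the set is the longest matching base domain.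
import Mathlib
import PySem

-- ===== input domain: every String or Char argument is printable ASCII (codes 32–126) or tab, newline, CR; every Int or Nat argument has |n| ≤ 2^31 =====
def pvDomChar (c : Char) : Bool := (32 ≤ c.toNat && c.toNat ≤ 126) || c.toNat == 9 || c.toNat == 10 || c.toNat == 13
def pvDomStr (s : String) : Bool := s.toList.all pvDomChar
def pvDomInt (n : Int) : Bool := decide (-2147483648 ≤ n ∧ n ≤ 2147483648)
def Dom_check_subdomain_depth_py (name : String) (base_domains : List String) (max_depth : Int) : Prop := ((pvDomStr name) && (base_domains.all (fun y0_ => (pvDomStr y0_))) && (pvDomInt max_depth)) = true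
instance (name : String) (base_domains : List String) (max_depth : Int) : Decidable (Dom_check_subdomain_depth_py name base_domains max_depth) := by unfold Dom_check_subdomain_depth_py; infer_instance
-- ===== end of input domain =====

-- B replaces A's scan over all base domains (longest match kept) by probing the
-- dot-suffixes of the name longest-first against a set of the lowered base domains:
-- the first hit is the longest match.  Objective: alternative algorithm, same cost.

-- ===== PORT A =====

-- shared tail of both Pythons (identical code after best_base is known):
-- the "no match" message, the depth computation from split("."), and the
-- violation message.
def pvFinish (name : String) (lower_name : List Char) (max_depth : Int) :
    Option (List Char) → Option String
  | none => some ("DNS name '" ++ name ++ "' does not match any configured base domain")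
  | some best_base =>
    let total_labels : Int := (PySem.Chars.splitOn lower_name ['.']).length
    let base_labels : Int := (PySem.Chars.splitOn best_base ['.']).length
    let depth : Int := total_labels - base_labels
    if max_depth < depth then
      some ("DNS name '" ++ name ++ "' has subdomain depth " ++ PySem.Int.toStr depth ++
        " which exceeds maximum allowed depth " ++ PySem.Int.toStr max_depth ++
        " (base domain: '" ++ String.ofList best_base ++ "')")
    else none

-- "match_name == bd_lower or match_name.endswith('.' + bd_lower)"
def pvMatches (m bd : List Char) : Bool := m == bd || PySem.Chars.endswith m ('.' :: bd)

-- one iteration of A's "find the longest matching base domain" loop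
def pvStepA (m : List Char) (best : Option (List Char)) (bd : String) : Option (List Char) :=
  if pvMatches m (PySem.Chars.lower bd.toList) then
    match best with
    | none => some (PySem.Chars.lower bd.toList)
    | some b =>
      if b.length < (PySem.Chars.lower bd.toList).length then some (PySem.Chars.lower bd.toList)
      else best
  else best

def check_subdomain_depth_py (name : String) (base_domains : List String) (max_depth : Int) : Option String :=
  let lower_name := PySem.Chars.lower name.toList
  -- lower_name.removeprefix("*.")  (exact: drop the prefix iff it is there)
  let match_name := if PySem.Chars.startswith lower_name ['*', '.'] then lower_name.drop 2 else lower_name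
  pvFinish name lower_name max_depth (base_domains.foldl (pvStepA match_name) none)

-- ===== PORT B =====

-- the suffix of match_name after each '.', in order of the dots (= B's
-- "for i, ch in enumerate(match_name): if ch == '.': cands.append(match_name[i+1:])")
def pvDotSuffixes : List Char → List (List Char)
  | [] => []
  | c :: rest => (if c == '.' then [rest] else []) ++ pvDotSuffixes rest

def check_subdomain_depth_py_alt (name : String) (base_domains : List String) (max_depth : Int) : Option String :=
  let lower_name := PySem.Chars.lower name.toList
  let match_name := if PySem.Chars.startswith lower_name ['*', '.'] then lower_name.drop 2 else lower_name
  let bases : PySem.Set (List Char) := PySem.Set.ofList (base_domains.map (fun bd => PySem.Chars.lower bd.toList))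
  let cands := match_name :: pvDotSuffixes match_name
  pvFinish name lower_name max_depth (cands.find? (fun c => PySem.Set.contains bases c))

-- ===== PRECONDITION & SPEC =====
def Spec_check_subdomain_depth_py (name : String) (base_domains : List String) (max_depth : Int) (out : Option String) : Prop := out = check_subdomain_depth_py_alt name base_domains max_depth
instance (name : String) (base_domains : List String) (max_depth : Int) (out : Option String) : Decidable (Spec_check_subdomain_depth_py name base_domains max_depth out) := by unfold Spec_check_subdomain_depth_py; infer_instance

-- ===== CLAIM (what is proved, stated in full; the proofs are below) =====
def Claim_equal_check_subdomain_depth_py : Prop := ∀ (name : String) (base_domains : List String) (max_depth : Int), Dom_check_subdomain_depth_py name base_domains max_depth → Spec_check_subdomain_depth_py name base_domains max_depth (check_subdomain_depth_py name base_domains max_depth)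

-- ===== LEMMAS AND PROOFS =====

-- membership in pvDotSuffixes is exactly "is the part after a dot"
theorem mem_pvDotSuffixes (m s : List Char) : s ∈ pvDotSuffixes m ↔ ('.' :: s) <:+ m := by
  induction m with
  | nil => simp [pvDotSuffixes]
  | cons c rest ih =>
    simp only [pvDotSuffixes, List.mem_append, ih, List.suffix_cons_iff, List.cons_eq_cons]
    by_cases h : c = '.' <;> simp [h] <;> tauto

-- a candidate list element is exactly a string pvMatches accepts
theorem mem_cands_iff (m c : List Char) :
    c ∈ m :: pvDotSuffixes m ↔ pvMatches m c = true := by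
  simp only [List.mem_cons, mem_pvDotSuffixes, pvMatches, Bool.or_eq_true, beq_iff_eq,
    PySem.Chars.endswith_iff]
  constructor
  · rintro (h | h)
    exacts [Or.inl h.symm, Or.inr h]
  · rintro (h | h)
    exacts [Or.inl h.symm, Or.inr h]

theorem length_lt_of_mem_pvDotSuffixes (m s : List Char) (h : s ∈ pvDotSuffixes m) :
    s.length < m.length := by
  have := (mem_pvDotSuffixes m s).mp h
  have := this.length_le
  simpa using Nat.lt_of_lt_of_le (Nat.lt_succ_self _) this

-- the candidate list has strictly decreasing lengths
theorem pairwise_cands (m : List Char) :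
    (m :: pvDotSuffixes m).Pairwise (fun a b => b.length < a.length) := by
  induction m with
  | nil => simp [pvDotSuffixes]
  | cons c rest ih =>
    have hrest : (pvDotSuffixes rest).Pairwise (fun a b => b.length < a.length) :=
      (List.pairwise_cons.mp ih).2
    have hlt : ∀ s ∈ pvDotSuffixes rest, s.length < rest.length :=
      fun s hs => length_lt_of_mem_pvDotSuffixes rest s hs
    constructor
    · intro s hs
      simp only [pvDotSuffixes, List.mem_append] at hs
      rcases hs with hs | hs
      · by_cases h : c = '.'
        · simp [h] at hs; subst hs; simp
        · simp [h] at hs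
      · exact Nat.lt_trans (hlt s hs) (by simp)
    · simp only [pvDotSuffixes]
      by_cases h : c = '.'
      · simp only [h]
        simpa using ⟨hlt, hrest⟩
      · simpa [h] using hrest

-- in a strictly-length-decreasing list, the first satisfying element is the
-- unique length-maximal one
theorem find?_of_maximal {l : List (List Char)} {p : List Char → Bool} {b : List Char}
    (hpw : l.Pairwise (fun a b => b.length < a.length)) (hb : b ∈ l) (hpb : p b = true)
    (hmax : ∀ c ∈ l, p c = true → c.length ≤ b.length) : l.find? p = some b := by
  induction l with
  | nil => cases hb
  | cons h t ih =>
    rcases List.pairwise_cons.mp hpw with ⟨hh, ht⟩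
    by_cases hp : p h = true
    · have hbh : b = h := by
        rcases List.mem_cons.mp hb with rfl | hbt
        · rfl
        · exact absurd (hmax h (by simp) hp) (Nat.not_le.mpr (hh b hbt))
      simp [List.find?, hp, hbh]
    · have hbt : b ∈ t := by
        rcases List.mem_cons.mp hb with rfl | hbt
        · exact absurd hpb hp
        · exact hbt
      simp only [List.find?, hp]
      exact ih ht hbt (fun c hc hpc => hmax c (List.mem_cons_of_mem _ hc) hpc)

-- pvStepA, case facts ------------------------------------------------------
theorem stepA_eq_none_iff (m : List Char) (acc : Option (List Char)) (bd : String) :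
    pvStepA m acc bd = none ↔ acc = none ∧ pvMatches m (PySem.Chars.lower bd.toList) = false := by
  unfold pvStepA
  by_cases hm : pvMatches m (PySem.Chars.lower bd.toList) = true
  · rw [if_pos hm]
    cases acc with
    | none => simp [hm]
    | some b0 =>
      dsimp only
      constructor
      · intro h; split_ifs at h <;> simp_all
      · rintro ⟨h, -⟩; cases h
  · rw [if_neg hm]
    cases acc <;> simp_all

theorem stepA_some_src (m : List Char) (acc : Option (List Char)) (bd : String) (b : List Char)
    (h : pvStepA m acc bd = some b) :
    (b = PySem.Chars.lower bd.toList ∧ pvMatches m b = true) ∨ acc = some b := by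
  unfold pvStepA at h
  by_cases hm : pvMatches m (PySem.Chars.lower bd.toList) = true
  · rw [if_pos hm] at h
    cases acc with
    | none =>
      injection h with h
      exact Or.inl ⟨h.symm, h ▸ hm⟩
    | some b0 =>
      dsimp only at h
      split_ifs at h with hlt
      · injection h with h
        exact Or.inl ⟨h.symm, h ▸ hm⟩
      · exact Or.inr h
  · rw [if_neg hm] at h
    exact Or.inr h

theorem stepA_some_of_match (m : List Char) (acc : Option (List Char)) (bd : String)
    (h : pvMatches m (PySem.Chars.lower bd.toList) = true) :
    ∃ x, pvStepA m acc bd = some x ∧ (PySem.Chars.lower bd.toList).length ≤ x.length := by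
  unfold pvStepA
  cases acc with
  | none => exact ⟨_, by simp [h], le_refl _⟩
  | some b0 =>
    by_cases hlt : b0.length < (PySem.Chars.lower bd.toList).length
    · exact ⟨_, by simp [h, hlt], le_refl _⟩
    · exact ⟨b0, by simp [h, hlt], Nat.le_of_not_lt hlt⟩

theorem stepA_acc_le (m : List Char) (bd : String) (b0 : List Char) :
    ∃ x, pvStepA m (some b0) bd = some x ∧ b0.length ≤ x.length := by
  unfold pvStepA
  by_cases h : pvMatches m (PySem.Chars.lower bd.toList) = true
  · by_cases hlt : b0.length < (PySem.Chars.lower bd.toList).length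
    · exact ⟨_, by simp [h, hlt], Nat.le_of_lt hlt⟩
    · exact ⟨b0, by simp [h, hlt], le_refl _⟩
  · exact ⟨b0, by simp [h], le_refl _⟩

-- the result state of A's fold, characterized (generalized accumulator)
theorem foldA_gen (m : List Char) (bds : List String) (acc : Option (List Char))
    (hacc : ∀ b, acc = some b → pvMatches m b = true) :
    (∀ b, bds.foldl (pvStepA m) acc = some b →
      pvMatches m b = true ∧
      ((∃ bd ∈ bds, PySem.Chars.lower bd.toList = b) ∨ acc = some b) ∧
      (∀ bd ∈ bds, pvMatches m (PySem.Chars.lower bd.toList) = true →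
        (PySem.Chars.lower bd.toList).length ≤ b.length) ∧
      (∀ b0, acc = some b0 → b0.length ≤ b.length)) ∧
    (bds.foldl (pvStepA m) acc = none →
      acc = none ∧ ∀ bd ∈ bds, pvMatches m (PySem.Chars.lower bd.toList) = false) := by
  induction bds generalizing acc with
  | nil =>
    refine ⟨fun b h => ⟨hacc b h, Or.inr h, by simp, fun b0 h0 => ?_⟩, fun h => ⟨h, by simp⟩⟩
    rw [h0] at h; cases h; exact le_refl _
  | cons bd rest ih =>
    have hacc' : ∀ b, pvStepA m acc bd = some b → pvMatches m b = true := by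
      intro b h
      rcases stepA_some_src m acc bd b h with ⟨_, hm⟩ | h'
      · exact hm
      · exact hacc b h'
    obtain ⟨ih1, ih2⟩ := ih (pvStepA m acc bd) hacc'
    simp only [List.foldl_cons]
    constructor
    · intro b hR
      obtain ⟨hm, hsrc, hmaxrest, haccle⟩ := ih1 b hR
      refine ⟨hm, ?_, ?_, ?_⟩
      · rcases hsrc with ⟨bd', hbd', hlb⟩ | h'
        · exact Or.inl ⟨bd', List.mem_cons_of_mem _ hbd', hlb⟩
        · rcases stepA_some_src m acc bd b h' with ⟨hb, _⟩ | h''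
          · exact Or.inl ⟨bd, List.mem_cons_self, hb.symm⟩
          · exact Or.inr h''
      · intro bd' hbd' hmatch
        rcases List.mem_cons.mp hbd' with rfl | hbd'
        · obtain ⟨x, hx, hle⟩ := stepA_some_of_match m acc bd' hmatch
          exact Nat.le_trans hle (haccle x hx)
        · exact hmaxrest bd' hbd' hmatch
      · intro b0 h0
        subst h0
        obtain ⟨x, hx, hle⟩ := stepA_acc_le m bd b0
        exact Nat.le_trans hle (haccle x hx)
    · intro hR
      obtain ⟨h1, h2⟩ := ih2 hR
      obtain ⟨h3, h4⟩ := (stepA_eq_none_iff m acc bd).mp h1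
      refine ⟨h3, ?_⟩
      intro bd' hbd'
      rcases List.mem_cons.mp hbd' with rfl | hbd'
      · exact h4
      · exact h2 bd' hbd'

-- A's fold equals B's first-hit suffix probe
theorem best_eq (m : List Char) (bds : List String) :
    bds.foldl (pvStepA m) none =
      (m :: pvDotSuffixes m).find?
        (fun c => PySem.Set.contains
          (PySem.Set.ofList (bds.map (fun bd => PySem.Chars.lower bd.toList))) c) := by
  have hcont : ∀ c : List Char,
      (PySem.Set.contains (PySem.Set.ofList (bds.map (fun bd => PySem.Chars.lower bd.toList))) c = true)
        ↔ ∃ bd ∈ bds, PySem.Chars.lower bd.toList = c := by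
    intro c
    simp [PySem.Set.contains, PySem.Set.mem_ofList]
  obtain ⟨hsome, hnone⟩ := foldA_gen m bds none (by simp)
  cases hR : bds.foldl (pvStepA m) none with
  | none =>
    symm
    rw [List.find?_eq_none]
    intro c hc hpc
    obtain ⟨bd, hbd, hlb⟩ := (hcont c).mp hpc
    have := (hnone hR).2 bd hbd
    rw [hlb] at this
    rw [(mem_cands_iff m c).mp hc] at this
    cases this
  | some b =>
    obtain ⟨hm, hsrc, hmax, _⟩ := hsome b hR
    have hsrc' : ∃ bd ∈ bds, PySem.Chars.lower bd.toList = b := by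
      rcases hsrc with h | h
      · exact h
      · cases h
    symm
    apply find?_of_maximal (pairwise_cands m) ((mem_cands_iff m b).mpr hm) ((hcont b).mpr hsrc')
    intro c hc hpc
    obtain ⟨bd, hbd, rfl⟩ := (hcont c).mp hpc
    exact hmax bd hbd ((mem_cands_iff m _).mp hc)

-- ===== VERDICT (by name: the statement is the Claim_ definition above) =====
theorem check_subdomain_depth_py_spec : Claim_equal_check_subdomain_depth_py := by
  intro name base_domains max_depth _
  unfold Spec_check_subdomain_depth_py check_subdomain_depth_py check_subdomain_depth_py_alt
  simp only []
  rw [best_eq]
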